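-- pv_equiv track=rewrite | github.com/FilipKalcic1/nova-verzija | scripts/test_faiss_integration.py | extract_http_methods
-- ===== SOURCE A (Python) =====
-- def extract_http_methods(tool_documentation: dict) -> dict:
--     """Extract HTTP methods from tool IDs (get_, post_, put_, delete_)."""
--     tool_methods = {}
--     for tool_id in tool_documentation:
--         tool_lower = tool_id.lower()
--         if tool_lower.startswith("get_"):
--             tool_methods[tool_id] = "GET"
--         elif tool_lower.startswith("post_"):
--             tool_methods[tool_id] = "POST"
--         elif tool_lower.startswith("put_"):
--             tool_methods[tool_id] = "PUT"
--         elif tool_lower.startswith("delete_"):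
--             tool_methods[tool_id] = "DELETE"
--         elif tool_lower.startswith("patch_"):
--             tool_methods[tool_id] = "PATCH"
--         else:
--             tool_methods[tool_id] = "GET"  # Default
--     return tool_methods
-- ===== SOURCE B (Python) =====
-- def extract_http_methods(tool_documentation: dict) -> dict:
--     """Extract HTTP methods from tool IDs (get_, post_, put_, delete_)."""
--     tool_methods = {tool_id: "GET" for tool_id in tool_documentation}
--     for prefix, method in (("post_", "POST"), ("put_", "PUT"),
--                            ("delete_", "DELETE"), ("patch_", "PATCH")):
--         for tool_id in tool_methods:
--             if tool_id.lower().startswith(prefix):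
--                 tool_methods[tool_id] = method
--     return tool_methods
-- ===== Notes on version B (the rewrite author's own statement) =====
-- stated objective: alternative
-- what changed: Replaces A's single pass with a per-key startswith if/elif chain by a default-then-override scheme: one pass initialising every key to GET, then one override pass per (prefix, method) pair that rewrites matching keys, correct because the five method prefixes are mutually exclusive.
import Mathlib
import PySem

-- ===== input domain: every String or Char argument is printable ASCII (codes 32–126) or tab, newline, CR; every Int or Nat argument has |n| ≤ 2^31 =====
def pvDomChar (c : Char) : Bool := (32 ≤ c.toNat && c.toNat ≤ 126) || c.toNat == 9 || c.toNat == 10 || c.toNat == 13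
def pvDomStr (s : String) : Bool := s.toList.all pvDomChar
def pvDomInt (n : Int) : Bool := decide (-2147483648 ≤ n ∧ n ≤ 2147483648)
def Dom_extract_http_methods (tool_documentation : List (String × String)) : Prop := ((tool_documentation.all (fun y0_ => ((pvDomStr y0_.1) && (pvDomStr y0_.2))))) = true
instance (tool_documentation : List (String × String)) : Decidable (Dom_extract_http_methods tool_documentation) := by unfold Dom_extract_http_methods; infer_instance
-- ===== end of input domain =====

-- B replaces A's per-key startswith if/elif chain by a default-then-override scheme: one pass defaulting every key to GET, then one override pass per method prefix (idiomatic/alternative; relies on the prefixes being mutually exclusive).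


-- ===== PORT A =====
def extract_http_methods (tool_documentation : List (String × String)) : List (String × String) :=
  (tool_documentation.foldl (fun tool_methods p =>
      let tool_id := p.1
      let tool_lower := PySem.Str.lower tool_id
      if PySem.Str.startswith tool_lower "get_" then tool_methods.insert tool_id "GET"
      else if PySem.Str.startswith tool_lower "post_" then tool_methods.insert tool_id "POST"
      else if PySem.Str.startswith tool_lower "put_" then tool_methods.insert tool_id "PUT"
      else if PySem.Str.startswith tool_lower "delete_" then tool_methods.insert tool_id "DELETE"
      else if PySem.Str.startswith tool_lower "patch_" then tool_methods.insert tool_id "PATCH"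
      else tool_methods.insert tool_id "GET")
    (PySem.Dict.empty : PySem.Dict String String)).items

-- ===== PORT B =====
-- the override table ( (prefix, method) pairs of Source B's outer loop )
def pvOverrides : List (String × String) :=
  [("post_", "POST"), ("put_", "PUT"), ("delete_", "DELETE"), ("patch_", "PATCH")]

-- 'for tool_id in tool_methods': the loop only overwrites values of existing keys, so the
-- iteration sequence is exactly the dict's key list at loop entry — ported as a fold over .keys (exact here).
def extract_http_methods_alt (tool_documentation : List (String × String)) : List (String × String) :=
  (pvOverrides.foldl
    (fun tool_methods pm =>
      tool_methods.keys.foldl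
        (fun d tool_id =>
          if PySem.Str.startswith (PySem.Str.lower tool_id) pm.1 then d.insert tool_id pm.2 else d)
        tool_methods)
    (tool_documentation.foldl (fun d p => d.insert p.1 "GET")
      (PySem.Dict.empty : PySem.Dict String String))).items

-- ===== PRECONDITION & SPEC =====
def Spec_extract_http_methods (tool_documentation : List (String × String)) (out : List (String × String)) : Prop := out = extract_http_methods_alt tool_documentation
instance (tool_documentation : List (String × String)) (out : List (String × String)) : Decidable (Spec_extract_http_methods tool_documentation out) := by unfold Spec_extract_http_methods; infer_instance

-- ===== CLAIM (what is proved, stated in full; the proofs are below) =====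
def Claim_equal_extract_http_methods : Prop := ∀ (tool_documentation : List (String × String)), Dom_extract_http_methods tool_documentation → Spec_extract_http_methods tool_documentation (extract_http_methods tool_documentation)

-- ===== LEMMAS AND PROOFS =====

-- A's per-key classifier (the if/elif chain's value)
def pvChain (tid : String) : String :=
  let l := PySem.Str.lower tid
  if PySem.Str.startswith l "get_" then "GET"
  else if PySem.Str.startswith l "post_" then "POST"
  else if PySem.Str.startswith l "put_" then "PUT"
  else if PySem.Str.startswith l "delete_" then "DELETE"
  else if PySem.Str.startswith l "patch_" then "PATCH"
  else "GET"

-- two incomparable prefixes cannot both start the same string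
lemma pv_excl (p q l : List Char) (hpq : ¬ p <+: q) (hqp : ¬ q <+: p)
    (h1 : PySem.Chars.startswith l p = true) (h2 : PySem.Chars.startswith l q = true) : False := by
  have h1' := (PySem.Chars.startswith_iff l p).mp h1
  have h2' := (PySem.Chars.startswith_iff l q).mp h2
  rcases List.prefix_or_prefix_of_prefix h1' h2' with h | h
  · exact hpq h
  · exact hqp h

-- getD of A's kind of build loop (value a function of the key)
lemma pv_getD_build (l : List (String × String)) (g : String → String)
    (d : PySem.Dict String String) (k : String) (dflt : String) :
    (l.foldl (fun d p => d.insert p.1 (g p.1)) d).getD k dflt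
      = if k ∈ l.map Prod.fst then g k else d.getD k dflt := by
  induction l generalizing d with
  | nil => simp
  | cons a t ih =>
    simp only [List.foldl_cons, ih, List.map_cons, List.mem_cons]
    by_cases hm : k ∈ t.map Prod.fst
    · simp [hm]
    · by_cases hk : k = a.1 <;> simp [hm, hk, PySem.Dict.getD_insert]

-- keys of one override pass: every insert hits a key of d', so keys are unchanged
lemma pv_keys_pass (l : List String) (c : String → Bool) (m : String)
    (d : PySem.Dict String String) (h : ∀ k ∈ l, k ∈ d.keys) :
    (l.foldl (fun d' k => if c k then d'.insert k m else d') d).keys = d.keys := by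
  induction l generalizing d with
  | nil => rfl
  | cons a t ih =>
    have ha : a ∈ d.keys := h a List.mem_cons_self
    have hkeys : (if c a then d.insert a m else d).keys = d.keys := by
      by_cases hc : c a
      · simp [hc, PySem.Dict.keys_insert_of_contains d m
          (by rw [PySem.Dict.contains_iff_mem_keys]; exact ha)]
      · simp [hc]
    simp only [List.foldl_cons]
    rw [ih _ (fun k hk => by rw [hkeys]; exact h k (List.mem_cons_of_mem _ hk)), hkeys]

-- getD of one override pass
lemma pv_getD_pass (l : List String) (c : String → Bool) (m : String)
    (d : PySem.Dict String String) (k dflt : String) :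
    (l.foldl (fun d' k => if c k then d'.insert k m else d') d).getD k dflt
      = if k ∈ l ∧ c k = true then m else d.getD k dflt := by
  induction l generalizing d with
  | nil => simp
  | cons a t ih =>
    simp only [List.foldl_cons, ih, List.mem_cons]
    by_cases ht : k ∈ t ∧ c k = true
    · simp [ht]
    · by_cases hk : k = a
      · subst hk
        by_cases hc : c k <;> simp [hc]
      · by_cases hc : c a <;> simp [hc, ht, hk, PySem.Dict.getD_insert]

-- per-string: the override cascade (last pass wins) equals A's chain, by mutual exclusivity of the prefixes
lemma pv_value_eq (l : List Char) :
    (if PySem.Chars.startswith l ("patch_" : String).toList then "PATCH"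
     else if PySem.Chars.startswith l ("delete_" : String).toList then "DELETE"
     else if PySem.Chars.startswith l ("put_" : String).toList then "PUT"
     else if PySem.Chars.startswith l ("post_" : String).toList then "POST"
     else "GET")
    = (if PySem.Chars.startswith l ("get_" : String).toList then ("GET" : String)
       else if PySem.Chars.startswith l ("post_" : String).toList then "POST"
       else if PySem.Chars.startswith l ("put_" : String).toList then "PUT"
       else if PySem.Chars.startswith l ("delete_" : String).toList then "DELETE"
       else if PySem.Chars.startswith l ("patch_" : String).toList then "PATCH"
       else "GET") := by
  by_cases h1 : PySem.Chars.startswith l ("get_" : String).toList = true <;>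
  by_cases h2 : PySem.Chars.startswith l ("post_" : String).toList = true <;>
  by_cases h3 : PySem.Chars.startswith l ("put_" : String).toList = true <;>
  by_cases h4 : PySem.Chars.startswith l ("delete_" : String).toList = true <;>
  by_cases h5 : PySem.Chars.startswith l ("patch_" : String).toList = true <;>
  first
    | (exact absurd h2 (fun h2 => pv_excl _ _ _ (by decide) (by decide) h1 h2))
    | (exact absurd h3 (fun h3 => pv_excl _ _ _ (by decide) (by decide) h1 h3))
    | (exact absurd h4 (fun h4 => pv_excl _ _ _ (by decide) (by decide) h1 h4))
    | (exact absurd h5 (fun h5 => pv_excl _ _ _ (by decide) (by decide) h1 h5))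
    | (exact absurd h3 (fun h3 => pv_excl _ _ _ (by decide) (by decide) h2 h3))
    | (exact absurd h4 (fun h4 => pv_excl _ _ _ (by decide) (by decide) h2 h4))
    | (exact absurd h5 (fun h5 => pv_excl _ _ _ (by decide) (by decide) h2 h5))
    | (exact absurd h4 (fun h4 => pv_excl _ _ _ (by decide) (by decide) h3 h4))
    | (exact absurd h5 (fun h5 => pv_excl _ _ _ (by decide) (by decide) h3 h5))
    | (exact absurd h5 (fun h5 => pv_excl _ _ _ (by decide) (by decide) h4 h5))
    | (simp only [h1, h2, h3, h4, h5, if_true]; try rfl)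

-- A's step is an insert of pvChain
lemma pv_A_eq_build (td : List (String × String)) :
    extract_http_methods td
      = (td.foldl (fun d p => d.insert p.1 (pvChain p.1)) (PySem.Dict.empty : PySem.Dict String String)).items := by
  unfold extract_http_methods
  congr 2
  funext d p
  simp only [pvChain]
  split_ifs <;> rfl

theorem extract_http_methods_spec : Claim_equal_extract_http_methods := by
  intro td _
  unfold Spec_extract_http_methods
  rw [pv_A_eq_build]
  unfold extract_http_methods_alt
  set d0 := td.foldl (fun d p => d.insert p.1 "GET") (PySem.Dict.empty : PySem.Dict String String) with hd0
  set dA := td.foldl (fun d p => d.insert p.1 (pvChain p.1)) (PySem.Dict.empty : PySem.Dict String String) with hdA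
  -- keys of both builds
  have hk0 : d0.keys = PySem.Set.update (PySem.Dict.empty : PySem.Dict String String).keys (td.map Prod.fst) :=
    PySem.Dict.keys_foldl_insert_key td Prod.fst _ _
  have hkA : dA.keys = d0.keys := by
    rw [hk0]; exact PySem.Dict.keys_foldl_insert_key td Prod.fst _ _
  have hnd0 : d0.keys.Nodup :=
    PySem.Dict.nodup_keys_foldl_insert_key td Prod.fst _ _ PySem.Dict.nodup_keys_empty
  have hndA : dA.keys.Nodup := hkA ▸ hnd0
  -- unfold the four passes of B
  simp only [pvOverrides, List.foldl_cons, List.foldl_nil]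
  set c1 := fun k => PySem.Str.startswith (PySem.Str.lower k) "post_" with hc1
  set c2 := fun k => PySem.Str.startswith (PySem.Str.lower k) "put_" with hc2
  set c3 := fun k => PySem.Str.startswith (PySem.Str.lower k) "delete_" with hc3
  set c4 := fun k => PySem.Str.startswith (PySem.Str.lower k) "patch_" with hc4
  set d1 := d0.keys.foldl (fun d k => if c1 k then d.insert k "POST" else d) d0 with hd1
  set d2 := d1.keys.foldl (fun d k => if c2 k then d.insert k "PUT" else d) d1 with hd2
  set d3 := d2.keys.foldl (fun d k => if c3 k then d.insert k "DELETE" else d) d2 with hd3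
  set d4 := d3.keys.foldl (fun d k => if c4 k then d.insert k "PATCH" else d) d3 with hd4
  have hk1 : d1.keys = d0.keys := pv_keys_pass _ _ _ _ (fun k hk => hk)
  have hk2 : d2.keys = d0.keys := by
    rw [hd2, pv_keys_pass _ _ _ _ (fun k hk => hk), hk1]
  have hk3 : d3.keys = d0.keys := by
    rw [hd3, pv_keys_pass _ _ _ _ (fun k hk => hk), hk2]
  have hk4 : d4.keys = d0.keys := by
    rw [hd4, pv_keys_pass _ _ _ _ (fun k hk => hk), hk3]
  -- values agree on every key
  have hval : ∀ k ∈ d0.keys, dA.getD k "" = d4.getD k "" := by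
    intro k hk
    have hmem : k ∈ td.map Prod.fst := by
      rw [hk0] at hk
      simp [PySem.Set.update] at hk
      exact (PySem.List.mem_dedup _ _).mp hk
    have hA : dA.getD k "" = pvChain k := by
      rw [hdA, pv_getD_build]; simp [hmem]
    have h0 : d0.getD k "" = "GET" := by
      rw [hd0, pv_getD_build td (fun _ => "GET") PySem.Dict.empty k ""]; simp [hmem]
    have hB : d4.getD k "" =
        (if c4 k then "PATCH" else if c3 k then "DELETE"
         else if c2 k then "PUT" else if c1 k then "POST" else "GET") := by
      rw [hd4, pv_getD_pass, hd3, pv_getD_pass, hd2, pv_getD_pass, hd1, pv_getD_pass, h0]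
      rw [hk3, hk2, hk1]
      by_cases g4 : c4 k <;> by_cases g3 : c3 k <;> by_cases g2 : c2 k <;> by_cases g1 : c1 k <;>
        simp [g1, g2, g3, g4, hk]
    rw [hA, hB, hc1, hc2, hc3, hc4]
    simp only [pvChain, PySem.Str.startswith_eq]
    exact (pv_value_eq ((PySem.Str.lower k).toList)).symm
  -- conclude: same keys, same values ⇒ same items
  have hiA := PySem.Dict.items_eq_map_keys dA hndA ""
  have hi4 := PySem.Dict.items_eq_map_keys d4 (hk4 ▸ hnd0) ""
  rw [hiA, hi4, hkA, hk4]
  exact List.map_congr_left (fun k hk => by rw [hval k hk])
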